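-- pv_equiv track=rewrite | github.com/GoodVessel92551/Booogle-Revise-Website | fun.py | leaderboard_dict
-- ===== SOURCE A (Python) =====
-- def leaderboard_dict(dictionary):
--     dictionary = dict(dictionary)
--     list_keys = list(dictionary)
--     for i in list_keys:
--         dictionary[i] = dict(dictionary[i])
--         list_keys_2 = list(dictionary[i])
--         for j in list_keys_2:
--             dictionary[i][j] = dict(dictionary[i][j])
--             list_keys_3 = list(dictionary[i][j])
--             for k in list_keys_3:
--                 dictionary[i][j][k] = dict(dictionary[i][j][k])
--     return dictionary
-- ===== SOURCE B (Python) =====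
-- def leaderboard_dict(dictionary):
--     def convert(m, depth):
--         if depth > 3:
--             return m
--         return {k: convert(v, depth + 1) for k, v in dict(m).items()}
--     return convert(dictionary, 0)
-- ===== Notes on version B (the rewrite author's own statement) =====
-- stated objective: simpler
-- what changed: Replaces A's three fixed nested loops that mutate the dicts in place with one depth-bounded recursive helper convert(m, depth) that rebuilds each level functionally and stops at depth 3, leaving level-4 values untouched.
import Mathlib
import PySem

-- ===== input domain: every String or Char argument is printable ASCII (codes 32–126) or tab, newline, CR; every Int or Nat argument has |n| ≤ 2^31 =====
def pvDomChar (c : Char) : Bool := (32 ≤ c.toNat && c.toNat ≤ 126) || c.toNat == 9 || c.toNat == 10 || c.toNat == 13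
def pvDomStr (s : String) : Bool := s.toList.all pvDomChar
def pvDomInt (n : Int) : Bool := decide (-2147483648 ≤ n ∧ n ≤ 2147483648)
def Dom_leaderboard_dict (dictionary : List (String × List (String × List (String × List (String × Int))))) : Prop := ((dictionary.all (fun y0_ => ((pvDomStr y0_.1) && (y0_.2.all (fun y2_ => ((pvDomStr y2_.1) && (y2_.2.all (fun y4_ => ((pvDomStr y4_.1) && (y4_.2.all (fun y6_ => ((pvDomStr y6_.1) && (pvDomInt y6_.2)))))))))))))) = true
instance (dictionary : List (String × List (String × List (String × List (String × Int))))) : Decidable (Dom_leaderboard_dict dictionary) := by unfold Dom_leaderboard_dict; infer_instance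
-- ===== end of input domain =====

-- B replaces A's three fixed nested in-place mutation loops with one depth-bounded
-- recursive helper that rebuilds each level functionally; objective: simpler.


-- ===== PORT A =====
-- innermost loop body: dictionary[i][j] = dict(dictionary[i][j]); for k in list(…): …[k] = dict(…[k])
def pvConvA2 (v : List (String × List (String × Int))) : List (String × List (String × Int)) :=
  let dj := PySem.Dict.ofList v
  (dj.keys.foldl (fun dj k => dj.insert k (PySem.Dict.ofList (dj.getD k [])).items) dj).items

-- middle loop body: dictionary[i] = dict(dictionary[i]); for j in list(…): …
def pvConvA1 (v : List (String × List (String × List (String × Int)))) : List (String × List (String × List (String × Int))) :=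
  let di := PySem.Dict.ofList v
  (di.keys.foldl (fun di j => di.insert j (pvConvA2 (di.getD j []))) di).items

def leaderboard_dict (dictionary : List (String × List (String × List (String × List (String × Int))))) : List (String × List (String × List (String × List (String × Int)))) :=
  let d := PySem.Dict.ofList dictionary
  (d.keys.foldl (fun d i => d.insert i (pvConvA1 (d.getD i []))) d).items

-- ===== PORT B =====
-- the nested-mapping type, indexed by REMAINING depth: level n+1 is a mapping, level 0 an int value
def PyLvl : Nat → Type
  | 0 => Int
  | n+1 => List (String × PyLvl n)

-- convert(m, depth): depth > 3 (here n = 0, a level-4 value) → unchanged;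
-- else {k: convert(v, depth+1) for k, v in dict(m).items()}
def pvConvB : (n : Nat) → PyLvl n → PyLvl n
  | 0, v => v
  | n+1, m =>
      (PySem.Dict.ofList ((PySem.Dict.ofList m).items.map (fun p => (p.1, pvConvB n p.2)))).items

def leaderboard_dict_alt (dictionary : List (String × List (String × List (String × List (String × Int))))) : List (String × List (String × List (String × List (String × Int)))) :=
  pvConvB 4 dictionary

-- ===== PRECONDITION & SPEC =====
def Spec_leaderboard_dict (dictionary : List (String × List (String × List (String × List (String × Int))))) (out : List (String × List (String × List (String × List (String × Int))))) : Prop := out = leaderboard_dict_alt dictionary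
instance (dictionary : List (String × List (String × List (String × List (String × Int))))) (out : List (String × List (String × List (String × List (String × Int))))) : Decidable (Spec_leaderboard_dict dictionary out) := by
  unfold Spec_leaderboard_dict
  letI i2 : DecidableEq (List (String × List (String × Int))) := instDecidableEqList
  letI i3 : DecidableEq (List (String × List (String × List (String × Int)))) := instDecidableEqList
  letI i4 : DecidableEq (List (String × List (String × List (String × List (String × Int))))) := instDecidableEqList
  exact i4 _ _

-- ===== CLAIM (what is proved, stated in full; the proofs are below) =====
def Claim_equal_leaderboard_dict : Prop := ∀ (dictionary : List (String × List (String × List (String × List (String × Int))))), Dom_leaderboard_dict dictionary → Spec_leaderboard_dict dictionary (leaderboard_dict dictionary)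

-- ===== LEMMAS AND PROOFS =====

-- one level of B's comprehension, as a generic helper for the proofs
def pvDmap {α β : Type} (pairs : List (String × α)) (f : α → β) : List (String × β) :=
  (PySem.Dict.ofList ((PySem.Dict.ofList pairs).items.map (fun p => (p.1, f p.2)))).items

-- a list whose keys are already distinct round-trips through Dict.ofList
theorem pv_ofList_items_of_nodup {ν : Type} (l : List (String × ν))
    (h : (l.map (·.1)).Nodup) : (PySem.Dict.ofList l).items = l := by
  have := PySem.Dict.items_foldl_insert_fresh (κ := String) (ν := ν) l (·.1) (·.2)
      PySem.Dict.empty (by intro a _; exact PySem.Dict.contains_empty _) h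
  simpa [PySem.Dict.ofList, PySem.Dict.update] using this

theorem pvDmap_eq {α β : Type} (pairs : List (String × α)) (f : α → β) :
    pvDmap pairs f = (PySem.Dict.ofList pairs).items.map (fun p => (p.1, f p.2)) := by
  unfold pvDmap
  apply pv_ofList_items_of_nodup
  have h : ((PySem.Dict.ofList pairs).items.map (fun p => (p.1, f p.2))).map (·.1)
      = (PySem.Dict.ofList pairs).keys := by
    simp [List.map_map, PySem.Dict.keys]
  rw [h]
  exact PySem.Dict.nodup_keys_ofList pairs

-- A's in-place update loop over a list of distinct existing keys rewrites every listed entry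
theorem pv_loop_items {ν : Type} (f : ν → ν) (dflt : ν) (ks : List String)
    (d : PySem.Dict String ν) (hnd : d.keys.Nodup)
    (hks : ∀ k ∈ ks, d.contains k = true) (hknd : ks.Nodup) :
    (ks.foldl (fun d' k => d'.insert k (f (d'.getD k dflt))) d).items
      = d.items.map (fun p => if p.1 ∈ ks then (p.1, f p.2) else p) := by
  induction ks generalizing d with
  | nil => simp
  | cons k ks ih =>
    have hck : d.contains k = true := hks k (by simp)
    have hknotin : k ∉ ks := (List.nodup_cons.mp hknd).1
    have hksnd : ks.Nodup := (List.nodup_cons.mp hknd).2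
    set d' := d.insert k (f (d.getD k dflt)) with hd'
    have hkeys : d'.keys = d.keys := PySem.Dict.keys_insert_of_contains d _ hck
    have hnd' : d'.keys.Nodup := hkeys ▸ hnd
    have hks' : ∀ j ∈ ks, d'.contains j = true := by
      intro j hj
      rw [PySem.Dict.contains_iff_mem_keys, hkeys, ← PySem.Dict.contains_iff_mem_keys]
      exact hks j (by simp [hj])
    have hitems' : d'.items = d.items.map (fun p => if p.1 == k then (k, f (d.getD k dflt)) else p) :=
      PySem.Dict.items_insert_of_contains d _ hck
    rw [List.foldl_cons, ih d' hnd' hks' hksnd, hitems', List.map_map]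
    apply List.map_congr_left
    intro p hp
    by_cases hpk : p.1 = k
    · have hv : d.getD p.1 dflt = p.2 := by
        have : (p.1, p.2) ∈ d.items := by simpa using hp
        exact PySem.Dict.getD_of_mem_items d this hnd dflt
      simp [Function.comp, hpk, ← hv, hknotin]
    · have : (p.1 == k) = false := by simp [hpk]
      simp [Function.comp, this, hpk]

-- each item key of a dict is one of its keys, so the guard in pv_loop_items is always true
theorem pv_loop_items_all {ν : Type} (f : ν → ν) (dflt : ν) (d : PySem.Dict String ν)
    (hnd : d.keys.Nodup) :
    (d.keys.foldl (fun d' k => d'.insert k (f (d'.getD k dflt))) d).items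
      = d.items.map (fun p => (p.1, f p.2)) := by
  rw [pv_loop_items f dflt d.keys d hnd
      (fun k hk => (PySem.Dict.contains_iff_mem_keys d k).mpr hk) hnd]
  apply List.map_congr_left
  intro p hp
  have : p.1 ∈ d.keys := PySem.Dict.mem_keys_of_mem_items d hp
  simp [this]

-- unfolding one level of B's recursion through the generic helper
theorem pvConvB_succ (n : Nat) (m : PyLvl (n + 1)) :
    pvConvB (n + 1) m = pvDmap m (pvConvB n) := rfl

-- B at the innermost mapping level: values (level-4 ints) are unchanged
theorem pvConvB_one (z : PyLvl 1) : pvConvB 1 z = (PySem.Dict.ofList z).items := by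
  rw [pvConvB_succ, pvDmap_eq]
  exact List.map_id' _

theorem pvConvA2_eq (v : List (String × List (String × Int))) :
    pvConvA2 v = pvConvB 2 v := by
  unfold pvConvA2
  rw [pvConvB_succ, pvDmap_eq]
  have h := pv_loop_items_all (fun z => (PySem.Dict.ofList z).items) []
    (PySem.Dict.ofList v) (PySem.Dict.nodup_keys_ofList v)
  rw [h]
  apply List.map_congr_left
  intro p _
  exact congrArg (fun t => (p.1, t)) (pvConvB_one p.2).symm

theorem pvConvA1_eq (v : List (String × List (String × List (String × Int)))) :
    pvConvA1 v = pvConvB 3 v := by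
  unfold pvConvA1
  rw [pvConvB_succ, pvDmap_eq]
  have h := pv_loop_items_all (fun y => pvConvA2 y) []
    (PySem.Dict.ofList v) (PySem.Dict.nodup_keys_ofList v)
  rw [h]
  apply List.map_congr_left
  intro p _
  exact congrArg (fun t => (p.1, t)) (pvConvA2_eq p.2)

-- ===== VERDICT (by name: the statement is the Claim_ definition above) =====
theorem leaderboard_dict_spec : Claim_equal_leaderboard_dict := by
  intro dictionary _
  unfold Spec_leaderboard_dict leaderboard_dict leaderboard_dict_alt
  rw [show pvConvB 4 dictionary = pvDmap dictionary (pvConvB 3) from rfl, pvDmap_eq]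
  have h := pv_loop_items_all (fun x => pvConvA1 x) []
    (PySem.Dict.ofList dictionary) (PySem.Dict.nodup_keys_ofList dictionary)
  rw [h]
  apply List.map_congr_left
  intro p _
  exact congrArg (fun t => (p.1, t)) (pvConvA1_eq p.2)
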